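-- pv_equiv track=rewrite | github.com/louisluzet/algorithm | algorithm/sortTest.py | solution
-- ===== SOURCE A (Python) =====
-- def solution(n, k, a, b):
--     a.sort()
--     b.sort(reverse=True)
--     for i in range(k):
--         if a[i] < b[i]:
--             a[i], b[i] = b[i], a[i]
--         else:
--             break
--     return sum(a)
-- ===== SOURCE B (Python) =====
-- def solution(n, k, a, b):
--     # Pool-and-select: instead of greedily swapping aligned pairs, take the k
--     # smallest of a and the k largest of b, pool them, and keep the largest
--     # |small| values of the pool in a.
--     if k <= 0:
--         return sum(a)
--     small = sorted(a)[:k]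
--     big = sorted(b, reverse=True)[:k]
--     kept = sorted(small + big, reverse=True)[:len(small)]
--     return sum(a) - sum(small) + sum(kept)
-- ===== Notes on version B (the rewrite author's own statement) =====
-- stated objective: alternative
-- what changed: B abandons A's aligned pairwise swap-with-break loop entirely: it pools the k smallest elements of a with the k largest elements of b and keeps the largest |pool-from-a| values of the pool (a selection on a merged multiset), returning sum(a) minus the discarded candidates plus the kept ones.
import Mathlib
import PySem

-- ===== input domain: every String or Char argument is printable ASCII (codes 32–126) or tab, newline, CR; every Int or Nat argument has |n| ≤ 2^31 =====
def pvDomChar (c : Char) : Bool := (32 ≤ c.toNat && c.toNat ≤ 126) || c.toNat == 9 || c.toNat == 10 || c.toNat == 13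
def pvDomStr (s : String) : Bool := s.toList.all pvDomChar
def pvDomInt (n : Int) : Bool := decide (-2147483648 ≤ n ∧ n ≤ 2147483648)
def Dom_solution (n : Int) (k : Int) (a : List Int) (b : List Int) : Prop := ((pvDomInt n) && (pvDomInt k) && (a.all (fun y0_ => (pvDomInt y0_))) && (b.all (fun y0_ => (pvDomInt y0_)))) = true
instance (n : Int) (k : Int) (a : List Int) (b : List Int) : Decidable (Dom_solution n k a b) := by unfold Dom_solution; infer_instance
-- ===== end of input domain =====

-- B replaces A's aligned pairwise swap-with-break loop by pooling the k smallest of a with the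
-- k largest of b and keeping the largest values of the pool (objective: alternative algorithm).
-- Python A sorts `a` and `b` IN PLACE (observable mutation); the equivalence here is about the return value only.

-- ===== PORT A =====
def solutionLoopA : Nat → Nat → List Int → List Int → List Int
  | 0, _, a, _ => a
  | f+1, i, a, b =>
    match PySem.List.pyGet? a (i : Int), PySem.List.pyGet? b (i : Int) with
    | some av, some bv =>
      if av < bv then solutionLoopA f (i+1) (a.set i bv) (b.set i av) else a
    | _, _ => a  -- Python raises IndexError here; such inputs are excluded by Pre_solution

def solution (n : Int) (k : Int) (a : List Int) (b : List Int) : Int :=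
  let a1 := PySem.List.sorted a (fun x => x) false
  let b1 := PySem.List.sorted b (fun x => x) true
  (solutionLoopA k.toNat 0 a1 b1).sum

-- ===== PORT B =====
def solution_alt (n : Int) (k : Int) (a : List Int) (b : List Int) : Int :=
  if k ≤ 0 then a.sum
  else
    let small := (PySem.List.sorted a (fun x => x) false).take k.toNat
    let big := (PySem.List.sorted b (fun x => x) true).take k.toNat
    let kept := (PySem.List.sorted (small ++ big) (fun x => x) true).take small.length
    a.sum - small.sum + kept.sum

-- ===== PRECONDITION & SPEC =====
-- Pre_ excludes exactly the inputs on which Python A raises IndexError: k exceeds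
-- min(len a, len b) and every aligned sorted pair up to that length still satisfies a_i < b_i.
def Pre_solution (n : Int) (k : Int) (a : List Int) (b : List Int) : Prop :=
  ¬ (((min a.length b.length : Nat) : Int) < k ∧
     ∀ j < min a.length b.length,
       (PySem.List.sorted a (fun x => x) false).getD j 0 <
       (PySem.List.sorted b (fun x => x) true).getD j 0)
instance (n : Int) (k : Int) (a : List Int) (b : List Int) : Decidable (Pre_solution n k a b) := by
  unfold Pre_solution; infer_instance

def pvWitness_solution : Int × Int × List Int × List Int := (0, 1, [1, 2], [5, 3])

def Spec_solution (n : Int) (k : Int) (a : List Int) (b : List Int) (out : Int) : Prop := out = solution_alt n k a b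
instance (n : Int) (k : Int) (a : List Int) (b : List Int) (out : Int) : Decidable (Spec_solution n k a b out) := by unfold Spec_solution; infer_instance

-- ===== CLAIM (what is proved, stated in full; the proofs are below) =====
def Claim_equal_solution : Prop := ∀ (n : Int) (k : Int) (a : List Int) (b : List Int), Dom_solution n k a b → Pre_solution n k a b → Spec_solution n k a b (solution n k a b)

-- ===== LEMMAS AND PROOFS =====

-- gain sum over the break-prefix of a paired list
def gsum (l : List (Int × Int)) : Int :=
  ((l.takeWhile (fun p => decide (p.1 < p.2))).map (fun p => p.2 - p.1)).sum

-- break-shaped sum of gains read off the (current) lists from index i, at most f steps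
def breakSum : Nat → Nat → List Int → List Int → Int
  | 0, _, _, _ => 0
  | f+1, i, a, b =>
    match a[i]?, b[i]? with
    | some x, some y => if x < y then (y - x) + breakSum f (i+1) a b else 0
    | _, _ => 0

theorem sum_set_some {l : List Int} {i : Nat} {x : Int} (y : Int) (h : l[i]? = some x) :
    (l.set i y).sum = l.sum + (y - x) := by
  have hi : i < l.length := by
    by_contra hn
    rw [List.getElem?_eq_none (Nat.le_of_not_lt hn)] at h
    cases h
  have hx : l[i] = x := by
    have := List.getElem?_eq_getElem hi
    rw [this] at h; exact Option.some.inj h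
  have hsplit : l.sum = (l.take i).sum + (l[i] :: l.drop (i+1)).sum := by
    conv_lhs => rw [← List.take_append_drop i l, List.sum_append,
      List.drop_eq_getElem_cons hi]
  rw [List.sum_set, if_pos hi, hsplit, List.sum_cons, hx]
  ring

theorem breakSum_set (x y : Int) :
    ∀ (f i j : Nat) (a b : List Int), j < i →
    breakSum f i (a.set j y) (b.set j x) = breakSum f i a b := by
  intro f
  induction f with
  | zero => intro i j a b _; rfl
  | succ f ih =>
    intro i j a b hji
    have ha : (a.set j y)[i]? = a[i]? := List.getElem?_set_ne (by omega)
    have hb : (b.set j x)[i]? = b[i]? := List.getElem?_set_ne (by omega)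
    simp only [breakSum, ha, hb]
    cases a[i]? with
    | none => rfl
    | some xa =>
      cases b[i]? with
      | none => rfl
      | some yb =>
        by_cases hlt : xa < yb
        · simp only [if_pos hlt, ih (i+1) j a b (by omega)]
        · simp [hlt]

theorem loopA_sum : ∀ (f i : Nat) (a b : List Int),
    (solutionLoopA f i a b).sum = a.sum + breakSum f i a b := by
  intro f
  induction f with
  | zero => intro i a b; simp [solutionLoopA, breakSum]
  | succ f ih =>
    intro i a b
    simp only [solutionLoopA, breakSum, PySem.List.pyGet?_natCast]
    cases hx : a[i]? with
    | none => simp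
    | some x =>
      cases hy : b[i]? with
      | none => simp
      | some y =>
        by_cases hlt : x < y
        · simp only [if_pos hlt, ih, sum_set_some y hx]
          rw [breakSum_set x y f (i+1) i a b (by omega)]
          ring
        · simp [hlt]

theorem zip_drop_cons {a b : List Int} {i : Nat} {x y : Int}
    (hx : a[i]? = some x) (hy : b[i]? = some y) :
    (a.drop i).zip (b.drop i) = (x, y) :: ((a.drop (i+1)).zip (b.drop (i+1))) := by
  have hia : i < a.length := by
    by_contra hn; rw [List.getElem?_eq_none (Nat.le_of_not_lt hn)] at hx; cases hx
  have hib : i < b.length := by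
    by_contra hn; rw [List.getElem?_eq_none (Nat.le_of_not_lt hn)] at hy; cases hy
  have hxv : a[i] = x := by
    have := List.getElem?_eq_getElem hia; rw [this] at hx; exact Option.some.inj hx
  have hyv : b[i] = y := by
    have := List.getElem?_eq_getElem hib; rw [this] at hy; exact Option.some.inj hy
  rw [List.drop_eq_getElem_cons hia, List.drop_eq_getElem_cons hib, hxv, hyv]
  rfl

theorem breakSum_eq_gsum : ∀ (f i : Nat) (a b : List Int),
    breakSum f i a b = gsum (((a.drop i).zip (b.drop i)).take f) := by
  intro f
  induction f with
  | zero => intro i a b; rfl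
  | succ f ih =>
    intro i a b
    simp only [breakSum]
    cases hx : a[i]? with
    | none =>
      have hlen : a.length ≤ i := by
        by_contra hn; rw [List.getElem?_eq_getElem (Nat.lt_of_not_le hn)] at hx; cases hx
      rw [List.drop_eq_nil_of_le hlen]
      rfl
    | some x =>
      cases hy : b[i]? with
      | none =>
        have hlen : b.length ≤ i := by
          by_contra hn; rw [List.getElem?_eq_getElem (Nat.lt_of_not_le hn)] at hy; cases hy
        rw [List.drop_eq_nil_of_le hlen, List.zip_nil_right]
        rfl
      | some y =>
        rw [zip_drop_cons hx hy, List.take_succ_cons]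
        by_cases hlt : x < y
        · simp only [if_pos hlt, ih (i+1)]
          simp [gsum, List.takeWhile_cons, hlt]
        · simp only [if_neg hlt]
          simp [gsum, List.takeWhile_cons, hlt]

theorem take_zip' : ∀ (u v : List Int) (n : Nat),
    (u.zip v).take n = (u.take n).zip (v.take n) := by
  intro u
  induction u with
  | nil => intro v n; simp
  | cons x u ih =>
    intro v n
    cases v with
    | nil => simp
    | cons y v =>
      cases n with
      | zero => rfl
      | succ n => simp [List.take_succ_cons, ih v n]

theorem sum_sub_zip : ∀ (u v : List Int), u.length = v.length →
    (((u.zip v).map (fun p => p.2 - p.1)).sum) = v.sum - u.sum := by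
  intro u
  induction u with
  | nil => intro v h; simp [(List.length_eq_zero_iff).mp h.symm]
  | cons x u ih =>
    intro v h
    cases v with
    | nil => simp at h
    | cons y v =>
      simp only [List.zip_cons_cons, List.map_cons, List.sum_cons, List.sum_cons,
        ih v (by simpa using h)]
      ring

theorem not_pred_at_takeWhile_length {α : Type} (p : α → Bool) :
    ∀ (l : List α) (v : α), l[(l.takeWhile p).length]? = some v → p v = false := by
  intro l
  induction l with
  | nil => intro v h; simp at h
  | cons x t ih =>
    intro v h
    by_cases hp : p x
    · rw [List.takeWhile_cons_of_pos hp] at h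
      simp only [List.length_cons, List.getElem?_cons_succ] at h
      exact ih v h
    · rw [List.takeWhile_cons_of_neg hp] at h
      simp only [List.length_nil, List.getElem?_cons_zero] at h
      cases h
      simpa using hp

theorem mono_asc {l : List Int} (hl : l.Pairwise (fun a b => a ≤ b))
    {p q : Nat} (hpq : p ≤ q) (hq : q < l.length) : l[p]'(by omega) ≤ l[q] := by
  rcases Nat.lt_or_ge p q with h | h
  · exact (List.pairwise_iff_getElem.mp hl) p q (by omega) hq h
  · have : p = q := by omega
    subst this; exact le_refl _

theorem mono_desc {l : List Int} (hl : l.Pairwise (fun a b => b ≤ a))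
    {p q : Nat} (hpq : p ≤ q) (hq : q < l.length) : l[q] ≤ l[p]'(by omega) := by
  rcases Nat.lt_or_ge p q with h | h
  · exact (List.pairwise_iff_getElem.mp hl) p q (by omega) hq h
  · have : p = q := by omega
    subst this; exact le_refl _

-- sorting (descending) a list that splits into a block K dominating a block D
-- sorts the blocks independently
theorem sorted_desc_split (l K D : List Int) (hperm : l.Perm (K ++ D))
    (hcross : ∀ x ∈ K, ∀ y ∈ D, y ≤ x) :
    PySem.List.sorted l (fun x => x) true =
      PySem.List.sorted K (fun x => x) true ++ PySem.List.sorted D (fun x => x) true := by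
  apply List.Perm.eq_of_pairwise (le := fun a b : Int => b ≤ a)
  · exact fun a b _ _ h1 h2 => le_antisymm h2 h1
  · exact PySem.List.sorted_pairwise_rev l (fun x => x)
  · refine List.pairwise_append.mpr ⟨PySem.List.sorted_pairwise_rev K (fun x => x),
      PySem.List.sorted_pairwise_rev D (fun x => x), ?_⟩
    intro x hx y hy
    exact hcross x ((PySem.List.mem_sorted _ _ _ _).mp hx) y ((PySem.List.mem_sorted _ _ _ _).mp hy)
  · exact ((PySem.List.sorted_perm l (fun x => x) true).trans hperm).trans
      (((PySem.List.sorted_perm K (fun x => x) true).append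
        (PySem.List.sorted_perm D (fun x => x) true)).symm)

-- the main identity: A's loop starting from the two sorted lists sums to B's pooled selection
theorem pool_eq (a b : List Int) (k' : Nat) :
    (solutionLoopA k' 0 (PySem.List.sorted a (fun x => x) false)
        (PySem.List.sorted b (fun x => x) true)).sum =
      a.sum - ((PySem.List.sorted a (fun x => x) false).take k').sum +
        ((PySem.List.sorted (((PySem.List.sorted a (fun x => x) false).take k') ++
            ((PySem.List.sorted b (fun x => x) true).take k')) (fun x => x) true).take
          ((PySem.List.sorted a (fun x => x) false).take k').length).sum := by
  set sa := PySem.List.sorted a (fun x => x) false with hsa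
  set sbd := PySem.List.sorted b (fun x => x) true with hsbd
  set sal := sa.take k' with hsal
  set bl := sbd.take k' with hbl
  set P := (sal.zip bl).takeWhile (fun p => decide (p.1 < p.2)) with hP
  set t := P.length with ht
  -- basic facts
  have htle : t ≤ min sal.length bl.length := by
    have := (List.takeWhile_prefix (l := sal.zip bl) (fun p => decide (p.1 < p.2))).length_le
    simpa [← hP, List.length_zip] using this
  have htsal : t ≤ sal.length := le_trans htle (Nat.min_le_left _ _)
  have htbl : t ≤ bl.length := le_trans htle (Nat.min_le_right _ _)
  have hPtake : P = (sal.zip bl).take t :=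
    List.prefix_iff_eq_take.mp (List.takeWhile_prefix _)
  -- monotonicity of the two sorted slices
  have hmsal : sal.Pairwise (fun x y => x ≤ y) :=
    (PySem.List.sorted_pairwise a (fun x => x)).sublist (List.take_sublist ..)
  have hmbl : bl.Pairwise (fun x y => y ≤ x) :=
    (PySem.List.sorted_pairwise_rev b (fun x => x)).sublist (List.take_sublist ..)
  -- every index below t satisfies the swap condition
  have hpred : ∀ j (hj : j < t), sal[j]'(by omega) < bl[j]'(by omega) := by
    intro j hj
    have hjz : j < (sal.zip bl).length := by simp [List.length_zip]; omega
    have hjt' : j < ((sal.zip bl).take t).length := by simp [List.length_take]; omega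
    have hmem : (sal.zip bl)[j] ∈ P := by
      rw [hPtake]
      simpa [List.getElem_take] using List.getElem_mem hjt'
    have := List.mem_takeWhile_imp hmem
    simpa [List.getElem_zip] using this
  -- at index t (if in range) the swap condition fails
  have hstop : ∀ (h1 : t < sal.length) (h2 : t < bl.length), bl[t] ≤ sal[t] := by
    intro h1 h2
    have hlt : t < (sal.zip bl).length := by simp [List.length_zip]; omega
    have hsome : (sal.zip bl)[((sal.zip bl).takeWhile (fun p => decide (p.1 < p.2))).length]? = some ((sal.zip bl)[t]'hlt) := by
      rw [← hP, ← ht]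
      exact List.getElem?_eq_getElem hlt
    have := not_pred_at_takeWhile_length (fun p : Int × Int => decide (p.1 < p.2))
      (sal.zip bl) _ hsome
    rw [List.getElem_zip] at this
    simpa using this
  -- A-side value
  have hA : (solutionLoopA k' 0 sa sbd).sum = a.sum + ((bl.take t).sum - (sal.take t).sum) := by
    rw [loopA_sum, breakSum_eq_gsum]
    have hperm : sa.sum = a.sum := List.Perm.sum_eq (PySem.List.sorted_perm a (fun x => x) false)
    rw [List.drop_zero, List.drop_zero, take_zip', gsum, ← hsal, ← hbl, ← hP, hPtake,
      take_zip', hperm]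
    rw [sum_sub_zip (sal.take t) (bl.take t)
      (by simp [List.length_take]; omega)]
  rw [hA]
  -- B-side: split the sorted pool
  have hKD : PySem.List.sorted (sal ++ bl) (fun x => x) true =
      PySem.List.sorted (bl.take t ++ sal.drop t) (fun x => x) true ++
      PySem.List.sorted (sal.take t ++ bl.drop t) (fun x => x) true := by
    apply sorted_desc_split
    · refine List.perm_iff_count.mpr fun x => ?_
      simp only [List.count_append]
      have h1 : sal.count x = (sal.take t).count x + (sal.drop t).count x := by
        rw [← List.count_append, List.take_append_drop]
      have h2 : bl.count x = (bl.take t).count x + (bl.drop t).count x := by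
        rw [← List.count_append, List.take_append_drop]
      omega
    · intro x hx y hy
      rcases List.mem_append.mp hx with hx | hx
      · -- x = bl[i], i < t
        obtain ⟨i, hi, hxe⟩ := List.mem_iff_getElem.mp hx
        have hit : i < t := by simp [List.length_take] at hi; omega
        have hibl : i < bl.length := by omega
        have hxv : x = bl[i] := by rw [← hxe]; simp [List.getElem_take]
        rcases List.mem_append.mp hy with hy | hy
        · -- y = sal[j], j < t
          obtain ⟨j, hj, hye⟩ := List.mem_iff_getElem.mp hy
          have hjt : j < t := by simp [List.length_take] at hj; omega
          have hjsal : j < sal.length := by omega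
          have hyv : y = sal[j] := by rw [← hye]; simp [List.getElem_take]
          rcases Nat.lt_or_ge j i with h | h
          · have h1 : sal[j] ≤ sal[i]'(by omega) := mono_asc hmsal (by omega) (by omega)
            have h2 : sal[i]'(by omega) < bl[i] := hpred i hit
            rw [hxv, hyv]; omega
          · have h1 : bl[j]'(by omega) ≤ bl[i] := mono_desc hmbl (by omega) (by omega)
            have h2 : sal[j] < bl[j]'(by omega) := hpred j hjt
            rw [hxv, hyv]; omega
        · -- y = bl[t + j]
          obtain ⟨j, hj, hye⟩ := List.mem_iff_getElem.mp hy
          have hjb : t + j < bl.length := by simp [List.length_drop] at hj; omega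
          have hyv : y = bl[t + j] := by rw [← hye]; simp [List.getElem_drop]
          have := mono_desc hmbl (show i ≤ t + j by omega) hjb
          rw [hxv, hyv]; exact this
      · -- x = sal[t + i]
        obtain ⟨i, hi, hxe⟩ := List.mem_iff_getElem.mp hx
        have hia : t + i < sal.length := by simp [List.length_drop] at hi; omega
        have hxv : x = sal[t + i] := by rw [← hxe]; simp [List.getElem_drop]
        rcases List.mem_append.mp hy with hy | hy
        · -- y = sal[j], j < t
          obtain ⟨j, hj, hye⟩ := List.mem_iff_getElem.mp hy
          have hjt : j < t := by simp [List.length_take] at hj; omega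
          have hyv : y = sal[j]'(by omega) := by rw [← hye]; simp [List.getElem_take]
          have := mono_asc hmsal (show j ≤ t + i by omega) hia
          rw [hxv, hyv]; exact this
        · -- y = bl[t + j]; needs the stop condition bl[t] ≤ sal[t]
          obtain ⟨j, hj, hye⟩ := List.mem_iff_getElem.mp hy
          have hjb : t + j < bl.length := by simp [List.length_drop] at hj; omega
          have hyv : y = bl[t + j] := by rw [← hye]; simp [List.getElem_drop]
          have h1 : bl[t + j] ≤ bl[t]'(by omega) := mono_desc hmbl (by omega) hjb
          have h2 : bl[t]'(by omega) ≤ sal[t]'(by omega) := hstop (by omega) (by omega)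
          have h3 : sal[t]'(by omega) ≤ sal[t + i] := mono_asc hmsal (by omega) hia
          rw [hxv, hyv]; omega
  rw [hKD]
  -- take |sal| of the split selects exactly the kept block
  have hlenK : (PySem.List.sorted (bl.take t ++ sal.drop t) (fun x => x) true).length
      = sal.length := by
    rw [PySem.List.length_sorted]
    simp [List.length_take, List.length_drop]
    omega
  rw [show (PySem.List.sorted (bl.take t ++ sal.drop t) (fun x => x) true ++
        PySem.List.sorted (sal.take t ++ bl.drop t) (fun x => x) true).take sal.length
      = PySem.List.sorted (bl.take t ++ sal.drop t) (fun x => x) true by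
    rw [← hlenK]; exact List.take_left ..]
  have hKsum : (PySem.List.sorted (bl.take t ++ sal.drop t) (fun x => x) true).sum
      = (bl.take t).sum + (sal.drop t).sum := by
    rw [List.Perm.sum_eq (PySem.List.sorted_perm _ (fun x => x) true), List.sum_append]
  rw [hKsum]
  have hsplit : sal.sum = (sal.take t).sum + (sal.drop t).sum := by
    rw [← List.sum_append, List.take_append_drop]
  omega

-- ===== VERDICT (by name: the statement is the Claim_ definition above) =====
theorem solution_spec : Claim_equal_solution := by
  intro n k a b _ _
  simp only [Spec_solution, solution, solution_alt]
  by_cases hk : k ≤ 0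
  · have h0 : k.toNat = 0 := Int.toNat_of_nonpos hk
    rw [if_pos hk, h0]
    exact List.Perm.sum_eq (PySem.List.sorted_perm a (fun x => x) false)
  · rw [if_neg hk]
    exact pool_eq a b k.toNat
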